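-- pv_equiv track=rewrite | github.com/adityakumar841208/Leetcode | Array&Strings/canBeTypedWord.py | canBeTypedWords
-- ===== SOURCE A (Python) =====
-- def canBeTypedWords(text, brokenLetters):
--
--         words = text.split(" ")
--         letters = list(brokenLetters)
--         count = 0
--
--         for word in words:
--             flag = 0
--             for char in letters:
--                 if char in word:
--                     flag = 1
--                     break
--
--             if flag != 1:
--                 count += 1
--
--         return count
-- ===== SOURCE B (Python) =====
-- def canBeTypedWords(text, brokenLetters):
--     broken = set(brokenLetters)
--     return sum(all(ch not in broken for ch in word) for word in text.split(" "))
-- ===== Notes on version B (the rewrite author's own statement) =====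
-- stated objective: idiomatic
-- what changed: B builds a set of broken letters once and counts words by a single membership pass over each word's characters (sum over a generator), instead of A's per-word loop over every broken letter with a substring scan and a flag variable.
import Mathlib
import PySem

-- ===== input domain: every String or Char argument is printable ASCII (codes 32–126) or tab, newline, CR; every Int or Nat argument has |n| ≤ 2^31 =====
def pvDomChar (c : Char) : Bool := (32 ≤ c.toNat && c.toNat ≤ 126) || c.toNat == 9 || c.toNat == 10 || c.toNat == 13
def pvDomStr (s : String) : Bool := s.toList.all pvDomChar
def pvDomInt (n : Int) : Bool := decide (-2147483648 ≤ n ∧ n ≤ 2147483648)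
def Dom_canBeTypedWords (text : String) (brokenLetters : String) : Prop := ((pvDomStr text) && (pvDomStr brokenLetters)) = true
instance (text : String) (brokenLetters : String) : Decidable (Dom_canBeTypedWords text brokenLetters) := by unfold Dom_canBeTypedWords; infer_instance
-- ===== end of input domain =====

-- B replaces A's per-word loop over every broken letter (flag + break) by one
-- membership pass over each word's characters against a set built once (idiomatic).

-- ===== PORT A =====
-- inner 'for char in letters: if char in word: flag = 1; break' (flag result)
def pvFlagA (letters : List Char) (word : String) : Int :=
  match letters with
  | [] => 0
  | c :: rest => if PySem.Chars.isIn [c] word.toList then 1 else pvFlagA rest word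

def canBeTypedWords (text : String) (brokenLetters : String) : Int :=
  let words := (PySem.Str.split? text " ").getD []
  let letters := brokenLetters.toList
  words.foldl (fun count word => if pvFlagA letters word ≠ 1 then count + 1 else count) 0

-- ===== PORT B =====
def canBeTypedWords_alt (text : String) (brokenLetters : String) : Int :=
  let broken : PySem.Set Char := PySem.Set.ofList brokenLetters.toList
  (((PySem.Str.split? text " ").getD []).countP
    (fun word => word.toList.all (fun ch => !(PySem.Set.contains broken ch))) : Nat)

-- ===== PRECONDITION & SPEC =====
def Spec_canBeTypedWords (text : String) (brokenLetters : String) (out : Int) : Prop := out = canBeTypedWords_alt text brokenLetters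
instance (text : String) (brokenLetters : String) (out : Int) : Decidable (Spec_canBeTypedWords text brokenLetters out) := by unfold Spec_canBeTypedWords; infer_instance

-- ===== CLAIM (what is proved, stated in full; the proofs are below) =====
def Claim_equal_canBeTypedWords : Prop := ∀ (text : String) (brokenLetters : String), Dom_canBeTypedWords text brokenLetters → Spec_canBeTypedWords text brokenLetters (canBeTypedWords text brokenLetters)

-- ===== LEMMAS AND PROOFS =====

lemma singleton_infix_iff_mem (c : Char) (l : List Char) : [c] <:+: l ↔ c ∈ l := by
  constructor
  · intro h; exact h.mem (List.mem_singleton_self c)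
  · intro h
    obtain ⟨s, t, rfl⟩ := List.append_of_mem h
    exact ⟨s, t, by simp⟩

lemma pvFlagA_eq_one_iff (ls : List Char) (w : String) :
    pvFlagA ls w = 1 ↔ ∃ c ∈ ls, c ∈ w.toList := by
  induction ls with
  | nil => simp [pvFlagA]
  | cons c rest ih =>
    by_cases h : PySem.Chars.isIn [c] w.toList = true
    · have := (PySem.Chars.isIn_iff_infix [c] w.toList).mp h
      simp [pvFlagA, h, (singleton_infix_iff_mem c w.toList).mp this]
    · have : c ∉ w.toList := fun hm => h ((PySem.Chars.isIn_iff_infix _ _).mpr ((singleton_infix_iff_mem c w.toList).mpr hm))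
      simp [pvFlagA, h, ih, this]

lemma pvFlagA_ne_one_eq (ls : List Char) (w : String) :
    decide (pvFlagA ls w ≠ 1) = w.toList.all (fun ch => !(PySem.Set.contains (PySem.Set.ofList ls) ch)) := by
  have h1 : (pvFlagA ls w ≠ 1) ↔ ∀ ch ∈ w.toList, ch ∉ ls := by
    rw [Ne, pvFlagA_eq_one_iff]
    constructor
    · intro h ch hch hc
      exact h ⟨ch, hc, hch⟩
    · rintro h ⟨c, hc, hcw⟩
      exact h c hcw hc
  have h2 : (w.toList.all (fun ch => !(PySem.Set.contains (PySem.Set.ofList ls) ch)) = true) ↔ ∀ ch ∈ w.toList, ch ∉ ls := by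
    simp [PySem.Set.mem_ofList]
  rw [Bool.eq_iff_iff, decide_eq_true_eq, h1, h2]

lemma foldl_count_eq_countP (p : String → Bool) (ws : List String) (n : Int) :
    ws.foldl (fun c w => if p w then c + 1 else c) n = n + ws.countP p := by
  induction ws generalizing n with
  | nil => simp
  | cons w rest ih =>
    by_cases h : p w
    · simp [List.foldl, h, ih]; ring
    · simp [List.foldl, h, ih]

-- ===== VERDICT (by name: the statement is the Claim_ definition above) =====
theorem canBeTypedWords_spec : Claim_equal_canBeTypedWords := by
  intro text brokenLetters _
  unfold Spec_canBeTypedWords canBeTypedWords canBeTypedWords_alt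
  have hcond : (fun word => decide (pvFlagA brokenLetters.toList word ≠ 1))
      = (fun word => word.toList.all (fun ch => !(PySem.Set.contains (PySem.Set.ofList brokenLetters.toList) ch))) := by
    funext w; exact pvFlagA_ne_one_eq _ w
  simp only []
  rw [show (fun (count : Int) word => if pvFlagA brokenLetters.toList word ≠ 1 then count + 1 else count)
      = (fun (count : Int) word => if (fun word => word.toList.all (fun ch => !(PySem.Set.contains (PySem.Set.ofList brokenLetters.toList) ch))) word then count + 1 else count) from by
    funext c w; rw [← hcond]; simp]
  rw [foldl_count_eq_countP]
  simp
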